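-- pv_equiv track=rewrite | github.com/sylfort/Python-practice | guessing_game.py | blow_checker
-- ===== SOURCE A (Python) =====
-- def blow_checker(num_after_hit, guess_after_hit):
--     blow = 0
--
--     for i in guess_after_hit:
--         if num_after_hit.count(i) == 1:
--             blow = 1
--         elif num_after_hit.count(i) == 2:
--             blow = 2
--         elif num_after_hit.count(i) == 3:
--             blow = 3
--
--     return blow
-- ===== SOURCE B (Python) =====
-- def blow_checker(num_after_hit, guess_after_hit):
--     for i in reversed(guess_after_hit):
--         c = num_after_hit.count(i)
--         if 1 <= c <= 3:
--             return c
--     return 0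
-- ===== Notes on version B (the rewrite author's own statement) =====
-- stated objective: faster
-- what changed: B scans guess_after_hit backwards and returns the count of the first element whose count lies in 1..3 (the last match in A's forward overwrite loop), exiting early instead of scanning the whole list.
import Mathlib
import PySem

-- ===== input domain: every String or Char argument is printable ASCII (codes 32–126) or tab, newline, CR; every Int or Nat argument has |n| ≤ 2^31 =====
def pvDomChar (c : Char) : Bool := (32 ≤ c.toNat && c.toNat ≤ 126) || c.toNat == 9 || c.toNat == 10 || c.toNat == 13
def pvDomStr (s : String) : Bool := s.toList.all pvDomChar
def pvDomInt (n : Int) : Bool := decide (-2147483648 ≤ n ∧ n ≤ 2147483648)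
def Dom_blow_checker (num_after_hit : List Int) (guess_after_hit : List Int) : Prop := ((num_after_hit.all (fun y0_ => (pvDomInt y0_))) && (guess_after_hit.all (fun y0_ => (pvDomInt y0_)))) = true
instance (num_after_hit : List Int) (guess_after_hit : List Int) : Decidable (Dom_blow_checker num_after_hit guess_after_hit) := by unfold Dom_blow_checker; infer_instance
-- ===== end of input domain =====

-- B scans guess_after_hit backwards and returns the first count in 1..3 (A's last overwrite), exiting early.

-- ===== PORT A =====
def blowStepA (num_after_hit : List Int) (blow : Int) (i : Int) : Int :=
  if (PySem.List.count num_after_hit i : Int) = 1 then 1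
  else if (PySem.List.count num_after_hit i : Int) = 2 then 2
  else if (PySem.List.count num_after_hit i : Int) = 3 then 3
  else blow

def blow_checker (num_after_hit : List Int) (guess_after_hit : List Int) : Int :=
  guess_after_hit.foldl (blowStepA num_after_hit) 0

-- ===== PORT B =====
def revScanB (num_after_hit : List Int) : List Int → Int
  | [] => 0
  | i :: rest =>
      let c : Int := PySem.List.count num_after_hit i
      if 1 ≤ c ∧ c ≤ 3 then c else revScanB num_after_hit rest

def blow_checker_alt (num_after_hit : List Int) (guess_after_hit : List Int) : Int :=
  revScanB num_after_hit guess_after_hit.reverse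

-- ===== PRECONDITION & SPEC =====
def Spec_blow_checker (num_after_hit : List Int) (guess_after_hit : List Int) (out : Int) : Prop := out = blow_checker_alt num_after_hit guess_after_hit
instance (num_after_hit : List Int) (guess_after_hit : List Int) (out : Int) : Decidable (Spec_blow_checker num_after_hit guess_after_hit out) := by unfold Spec_blow_checker; infer_instance

-- ===== CLAIM =====
def Claim_equal_blow_checker : Prop := ∀ (num_after_hit : List Int) (guess_after_hit : List Int), Dom_blow_checker num_after_hit guess_after_hit → Spec_blow_checker num_after_hit guess_after_hit (blow_checker num_after_hit guess_after_hit)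

-- ===== LEMMAS AND PROOFS =====
theorem blow_eq (num_after_hit guess_after_hit : List Int) :
    guess_after_hit.foldl (blowStepA num_after_hit) 0 = revScanB num_after_hit guess_after_hit.reverse := by
  induction guess_after_hit using List.reverseRecOn with
  | nil => simp [revScanB]
  | append_singleton xs x ih =>
      rw [List.foldl_append, List.reverse_append]
      simp only [List.foldl_cons, List.foldl_nil, List.reverse_cons, List.reverse_nil,
        List.nil_append, List.singleton_append]
      simp only [revScanB, blowStepA]
      split_ifs <;> omega
-- ===== VERDICT =====
theorem blow_checker_spec : Claim_equal_blow_checker := by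
  intro n g _
  unfold Spec_blow_checker blow_checker blow_checker_alt
  exact blow_eq n g
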